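-- pv_equiv track=rewrite | github.com/esddse/NER | structured_perceptron.py | generate_node_features
-- ===== SOURCE A (Python) =====
-- def generate_node_features(X):
-- 	length = len(X)
-- 	for i in range(length):
-- 		pred3 = X[i-3] if i-3 >= 0 else 'start'
-- 		pred2 = X[i-2] if i-2 >= 0 else 'start'
-- 		pred1 = X[i-1] if i-1 >= 0 else 'start'
-- 		current = X[i]
-- 		post1 = X[i+1] if i+1 < length else 'end'
-- 		post2 = X[i+2] if i+2 < length else 'end'
-- 		post3 = X[i+3] if i+3 < length else 'end'
-- 		feature_vector = ['current'+current,
-- 		                  'pred1'+pred1,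
-- 		                  'pred2'+pred2,
-- 		                  'pred3'+pred3,
-- 		                  'post1'+post1,
-- 		                  'post2'+post2,
-- 		                  'post3'+post3,
-- 		                  'pred1+current'+pred1+current,
-- 		                  'current+post1'+current+post1,
-- 		                  'pred2+pred1'+pred2+pred1,
-- 		                  'post1+post2'+post1+post2,
-- 		                  'pred3+pred2'+pred3+pred2,
-- 		                  'post2+post3'+post2+post3,
-- 		                  'pred3+pred2+pred1'+pred3+pred2+pred1,
-- 		                  'post1+post2+post3'+post1+post2+post3,
-- 		                  'pred1+current+post1'+pred1+current+post1,
-- 		                  'pred1+current'+pred1+current,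
-- 		                  'current+post1+post2'+current+post1+post2,
-- 		                  ]
-- 		yield feature_vector
-- ===== SOURCE B (Python) =====
-- def _features(window):
-- 	# window holds the seven context tokens for one position
-- 	pred3, pred2, pred1, current, post1, post2, post3 = window
-- 	return ['current'+current,
-- 	        'pred1'+pred1,
-- 	        'pred2'+pred2,
-- 	        'pred3'+pred3,
-- 	        'post1'+post1,
-- 	        'post2'+post2,
-- 	        'post3'+post3,
-- 	        'pred1+current'+pred1+current,
-- 	        'current+post1'+current+post1,
-- 	        'pred2+pred1'+pred2+pred1,
-- 	        'post1+post2'+post1+post2,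
-- 	        'pred3+pred2'+pred3+pred2,
-- 	        'post2+post3'+post2+post3,
-- 	        'pred3+pred2+pred1'+pred3+pred2+pred1,
-- 	        'post1+post2+post3'+post1+post2+post3,
-- 	        'pred1+current+post1'+pred1+current+post1,
-- 	        'pred1+current'+pred1+current,
-- 	        'current+post1+post2'+current+post1+post2,
-- 	        ]
--
-- def generate_node_features(X):
-- 	# Sliding-window queue: keep the current 7-token context window and slide it
-- 	# one token at a time over the sentinel-terminated stream; no indexing at all.
-- 	# The fourth 'end' terminator only feeds the final (discarded) slide, so the
-- 	# loop is uniform: one yield and one slide per incoming token.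
-- 	stream = list(X) + ['end', 'end', 'end', 'end']
-- 	window = ['start', 'start', 'start'] + stream[:4]
-- 	for nxt in stream[4:]:
-- 		yield _features(window)
-- 		window = window[1:] + [nxt]
-- ===== Notes on version B (the rewrite author's own statement) =====
-- stated objective: alternative
-- what changed: Replaces per-index boundary conditionals with a sliding 7-token window queue advanced one token at a time over a sentinel-terminated stream, so no position is ever indexed or bounds-checked.
import Mathlib
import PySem

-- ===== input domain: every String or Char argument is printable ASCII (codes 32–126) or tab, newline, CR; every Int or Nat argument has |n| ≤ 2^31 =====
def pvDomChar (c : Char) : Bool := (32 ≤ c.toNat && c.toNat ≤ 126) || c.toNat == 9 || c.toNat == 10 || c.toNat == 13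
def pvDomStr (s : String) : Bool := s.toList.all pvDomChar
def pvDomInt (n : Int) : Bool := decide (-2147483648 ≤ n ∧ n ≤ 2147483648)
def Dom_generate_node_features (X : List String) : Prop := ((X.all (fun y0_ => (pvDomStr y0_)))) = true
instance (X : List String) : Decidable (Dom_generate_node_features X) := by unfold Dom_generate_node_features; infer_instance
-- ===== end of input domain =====

-- B slides a 7-token context window one token at a time over the sentinel-terminated stream instead of A's per-index boundary conditionals; same return value, proved equal.

-- ===== PORT A =====
def generate_node_features (X : List String) : List (List String) :=
  let length : Int := X.length
  (PySem.List.pyRange 0 length 1).map (fun i =>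
    let pred3 := if i - 3 ≥ 0 then PySem.List.pyGetD X (i - 3) "" else "start"
    let pred2 := if i - 2 ≥ 0 then PySem.List.pyGetD X (i - 2) "" else "start"
    let pred1 := if i - 1 ≥ 0 then PySem.List.pyGetD X (i - 1) "" else "start"
    let current := PySem.List.pyGetD X i ""
    let post1 := if i + 1 < length then PySem.List.pyGetD X (i + 1) "" else "end"
    let post2 := if i + 2 < length then PySem.List.pyGetD X (i + 2) "" else "end"
    let post3 := if i + 3 < length then PySem.List.pyGetD X (i + 3) "" else "end"
    ["current" ++ current,
     "pred1" ++ pred1,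
     "pred2" ++ pred2,
     "pred3" ++ pred3,
     "post1" ++ post1,
     "post2" ++ post2,
     "post3" ++ post3,
     "pred1+current" ++ pred1 ++ current,
     "current+post1" ++ current ++ post1,
     "pred2+pred1" ++ pred2 ++ pred1,
     "post1+post2" ++ post1 ++ post2,
     "pred3+pred2" ++ pred3 ++ pred2,
     "post2+post3" ++ post2 ++ post3,
     "pred3+pred2+pred1" ++ pred3 ++ pred2 ++ pred1,
     "post1+post2+post3" ++ post1 ++ post2 ++ post3,
     "pred1+current+post1" ++ pred1 ++ current ++ post1,
     "pred1+current" ++ pred1 ++ current,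
     "current+post1+post2" ++ current ++ post1 ++ post2])

-- ===== PORT B =====
-- _features(window): tuple-unpack of the 7-token window; the catch-all is unreachable
-- (the loop invariant keeps the window at 7 tokens whenever it is read).
def gnf_features (w : List String) : List String :=
  match w with
  | pred3 :: pred2 :: pred1 :: current :: post1 :: post2 :: post3 :: _ =>
    ["current" ++ current,
     "pred1" ++ pred1,
     "pred2" ++ pred2,
     "pred3" ++ pred3,
     "post1" ++ post1,
     "post2" ++ post2,
     "post3" ++ post3,
     "pred1+current" ++ pred1 ++ current,
     "current+post1" ++ current ++ post1,
     "pred2+pred1" ++ pred2 ++ pred1,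
     "post1+post2" ++ post1 ++ post2,
     "pred3+pred2" ++ pred3 ++ pred2,
     "post2+post3" ++ post2 ++ post3,
     "pred3+pred2+pred1" ++ pred3 ++ pred2 ++ pred1,
     "post1+post2+post3" ++ post1 ++ post2 ++ post3,
     "pred1+current+post1" ++ pred1 ++ current ++ post1,
     "pred1+current" ++ pred1 ++ current,
     "current+post1+post2" ++ current ++ post1 ++ post2]
  | _ => []

-- the 'for nxt in stream[4:]' loop: emit features of the window, then slide it by nxt
def gnf_loop (window : List String) : List String → List (List String)
  | [] => []
  | nxt :: rest => gnf_features window :: gnf_loop (window.drop 1 ++ [nxt]) rest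

def generate_node_features_alt (X : List String) : List (List String) :=
  let stream := X ++ ["end", "end", "end", "end"]
  let window := ["start", "start", "start"] ++ stream.take 4
  gnf_loop window (stream.drop 4)

-- ===== PRECONDITION & SPEC =====
def Spec_generate_node_features (X : List String) (out : List (List String)) : Prop := out = generate_node_features_alt X
instance (X : List String) (out : List (List String)) : Decidable (Spec_generate_node_features X out) := by unfold Spec_generate_node_features; infer_instance

-- ===== CLAIM (what is proved, stated in full; the proofs are below) =====
def Claim_equal_generate_node_features : Prop := ∀ (X : List String), Dom_generate_node_features X → Spec_generate_node_features X (generate_node_features X)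

-- ===== LEMMAS AND PROOFS =====

-- Proof-only intermediate form: A's per-position vector read off the padded list by fixed offsets.
def gnf_pad (X : List String) : List (List String) :=
  let P := List.replicate 3 "start" ++ X ++ List.replicate 3 "end"
  (PySem.List.pyRange 0 (X.length : Int) 1).map (fun i =>
    let pred3 := PySem.List.pyGetD P i ""
    let pred2 := PySem.List.pyGetD P (i + 1) ""
    let pred1 := PySem.List.pyGetD P (i + 2) ""
    let current := PySem.List.pyGetD P (i + 3) ""
    let post1 := PySem.List.pyGetD P (i + 4) ""
    let post2 := PySem.List.pyGetD P (i + 5) ""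
    let post3 := PySem.List.pyGetD P (i + 6) ""
    ["current" ++ current,
     "pred1" ++ pred1,
     "pred2" ++ pred2,
     "pred3" ++ pred3,
     "post1" ++ post1,
     "post2" ++ post2,
     "post3" ++ post3,
     "pred1+current" ++ pred1 ++ current,
     "current+post1" ++ current ++ post1,
     "pred2+pred1" ++ pred2 ++ pred1,
     "post1+post2" ++ post1 ++ post2,
     "pred3+pred2" ++ pred3 ++ pred2,
     "post2+post3" ++ post2 ++ post3,
     "pred3+pred2+pred1" ++ pred3 ++ pred2 ++ pred1,
     "post1+post2+post3" ++ post1 ++ post2 ++ post3,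
     "pred1+current+post1" ++ pred1 ++ current ++ post1,
     "pred1+current" ++ pred1 ++ current,
     "current+post1+post2" ++ current ++ post1 ++ post2])

-- Reading the padded list at a natural offset m < len X + 6.
theorem pad_getD (X : List String) (m : Nat) (hm : m < X.length + 6) :
    PySem.List.pyGetD (List.replicate 3 "start" ++ X ++ List.replicate 3 "end") (m : Int) "" =
      if m < 3 then "start" else if m - 3 < X.length then X.getD (m - 3) "" else "end" := by
  rw [PySem.List.pyGetD_natCast, List.append_assoc, List.getD_eq_getElem?_getD]
  by_cases h3 : m < 3
  · rw [if_pos h3, List.getElem?_append_left (by simpa using h3)]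
    interval_cases m <;> simp
  · rw [if_neg h3]
    have h3' := Nat.not_lt.mp h3
    rw [List.getElem?_append_right (by simpa using h3')]
    simp only [List.length_replicate]
    by_cases hx : m - 3 < X.length
    · rw [if_pos hx, List.getElem?_append_left hx, List.getD_eq_getElem?_getD]
    · rw [if_neg hx, List.getElem?_append_right (by omega), List.getElem?_replicate]
      have h : m - 3 - X.length < 3 := by omega
      simp [h]

theorem a_eq_pad (X : List String) :
    generate_node_features X = gnf_pad X := by
  unfold generate_node_features gnf_pad
  apply List.map_congr_left
  intro i hi
  rw [PySem.List.mem_pyRange_one] at hi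
  obtain ⟨h0, hn⟩ := hi
  obtain ⟨j, rfl⟩ : ∃ j : Nat, i = (j : Int) := ⟨i.toNat, (Int.toNat_of_nonneg h0).symm⟩
  have hj : j < X.length := by exact_mod_cast hn
  have c1 : ((j : Int) + 1) = ((j + 1 : Nat) : Int) := by push_cast; ring
  have c2 : ((j : Int) + 2) = ((j + 2 : Nat) : Int) := by push_cast; ring
  have c3 : ((j : Int) + 3) = ((j + 3 : Nat) : Int) := by push_cast; ring
  have c4 : ((j : Int) + 4) = ((j + 4 : Nat) : Int) := by push_cast; ring
  have c5 : ((j : Int) + 5) = ((j + 5 : Nat) : Int) := by push_cast; ring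
  have c6 : ((j : Int) + 6) = ((j + 6 : Nat) : Int) := by push_cast; ring
  have cur : PySem.List.pyGetD X ((j : Int)) "" = PySem.List.pyGetD (List.replicate 3 "start" ++ X ++ List.replicate 3 "end") ((j : Int) + 3) "" := by
    rw [c3, pad_getD X (j + 3) (by omega),
        if_neg (show ¬(j + 3 < 3) by omega), if_pos (show j + 3 - 3 < X.length by omega),
        PySem.List.pyGetD_natCast]
    try (congr 1 <;> omega)
  have pr1 : (if (j : Int) - 1 ≥ 0 then PySem.List.pyGetD X ((j : Int) - 1) "" else "start") = PySem.List.pyGetD (List.replicate 3 "start" ++ X ++ List.replicate 3 "end") ((j : Int) + 2) "" := by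
    rw [c2, pad_getD X (j + 2) (by omega)]
    by_cases hk : 1 ≤ j
    · rw [if_pos (show (j : Int) - 1 ≥ 0 by push_cast; omega),
          if_neg (show ¬(j + 2 < 3) by omega), if_pos (show j + 2 - 3 < X.length by omega)]
      have e : ((j : Int) - 1) = ((j - 1 : Nat) : Int) := by push_cast [hk]; ring
      rw [e, PySem.List.pyGetD_natCast]
      try (congr 1 <;> omega)
    · rw [if_neg (show ¬((j : Int) - 1 ≥ 0) by push_cast; omega), if_pos (show j + 2 < 3 by omega)]
  have pr2 : (if (j : Int) - 2 ≥ 0 then PySem.List.pyGetD X ((j : Int) - 2) "" else "start") = PySem.List.pyGetD (List.replicate 3 "start" ++ X ++ List.replicate 3 "end") ((j : Int) + 1) "" := by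
    rw [c1, pad_getD X (j + 1) (by omega)]
    by_cases hk : 2 ≤ j
    · rw [if_pos (show (j : Int) - 2 ≥ 0 by push_cast; omega),
          if_neg (show ¬(j + 1 < 3) by omega), if_pos (show j + 1 - 3 < X.length by omega)]
      have e : ((j : Int) - 2) = ((j - 2 : Nat) : Int) := by push_cast [hk]; ring
      rw [e, PySem.List.pyGetD_natCast]
      try (congr 1 <;> omega)
    · rw [if_neg (show ¬((j : Int) - 2 ≥ 0) by push_cast; omega), if_pos (show j + 1 < 3 by omega)]
  have pr3 : (if (j : Int) - 3 ≥ 0 then PySem.List.pyGetD X ((j : Int) - 3) "" else "start") = PySem.List.pyGetD (List.replicate 3 "start" ++ X ++ List.replicate 3 "end") ((j : Int)) "" := by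
    rw [pad_getD X j (by omega)]
    by_cases hk : 3 ≤ j
    · rw [if_pos (show (j : Int) - 3 ≥ 0 by push_cast; omega),
          if_neg (show ¬(j < 3) by omega), if_pos (show j - 3 < X.length by omega)]
      have e : ((j : Int) - 3) = ((j - 3 : Nat) : Int) := by push_cast [hk]; ring
      rw [e, PySem.List.pyGetD_natCast]
      try (congr 1 <;> omega)
    · rw [if_neg (show ¬((j : Int) - 3 ≥ 0) by push_cast; omega), if_pos (show j < 3 by omega)]
  have po1 : (if (j : Int) + 1 < (X.length : Int) then PySem.List.pyGetD X ((j : Int) + 1) "" else "end") = PySem.List.pyGetD (List.replicate 3 "start" ++ X ++ List.replicate 3 "end") ((j : Int) + 4) "" := by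
    rw [c4, pad_getD X (j + 4) (by omega), if_neg (show ¬(j + 4 < 3) by omega)]
    by_cases hk : j + 1 < X.length
    · rw [if_pos (show (j : Int) + 1 < (X.length : Int) by push_cast; omega),
          if_pos (show j + 4 - 3 < X.length by omega),
          c1, PySem.List.pyGetD_natCast]
      try (congr 1 <;> omega)
    · rw [if_neg (show ¬((j : Int) + 1 < (X.length : Int)) by push_cast; omega),
          if_neg (show ¬(j + 4 - 3 < X.length) by omega)]
  have po2 : (if (j : Int) + 2 < (X.length : Int) then PySem.List.pyGetD X ((j : Int) + 2) "" else "end") = PySem.List.pyGetD (List.replicate 3 "start" ++ X ++ List.replicate 3 "end") ((j : Int) + 5) "" := by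
    rw [c5, pad_getD X (j + 5) (by omega), if_neg (show ¬(j + 5 < 3) by omega)]
    by_cases hk : j + 2 < X.length
    · rw [if_pos (show (j : Int) + 2 < (X.length : Int) by push_cast; omega),
          if_pos (show j + 5 - 3 < X.length by omega),
          c2, PySem.List.pyGetD_natCast]
      try (congr 1 <;> omega)
    · rw [if_neg (show ¬((j : Int) + 2 < (X.length : Int)) by push_cast; omega),
          if_neg (show ¬(j + 5 - 3 < X.length) by omega)]
  have po3 : (if (j : Int) + 3 < (X.length : Int) then PySem.List.pyGetD X ((j : Int) + 3) "" else "end") = PySem.List.pyGetD (List.replicate 3 "start" ++ X ++ List.replicate 3 "end") ((j : Int) + 6) "" := by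
    rw [c6, pad_getD X (j + 6) (by omega), if_neg (show ¬(j + 6 < 3) by omega)]
    by_cases hk : j + 3 < X.length
    · rw [if_pos (show (j : Int) + 3 < (X.length : Int) by push_cast; omega),
          if_pos (show j + 6 - 3 < X.length by omega),
          c3, PySem.List.pyGetD_natCast]
      try (congr 1 <;> omega)
    · rw [if_neg (show ¬((j : Int) + 3 < (X.length : Int)) by push_cast; omega),
          if_neg (show ¬(j + 6 - 3 < X.length) by omega)]
  simp only [cur, pr1, pr2, pr3, po1, po2, po3]

-- The sliding step: from window P[i:i+7] it produces window P[i+1:i+8].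
theorem window_slide (P : List String) (i : Nat) :
    ((P.drop i).take 7).drop 1 ++ (P.drop (i + 7)).take 1 = (P.drop (i + 1)).take 7 := by
  have h1 : ((P.drop i).take 7).drop 1 = ((P.drop i).drop 1).take 6 := by
    rw [List.drop_take]
  have h2 : (P.drop i).drop 1 = P.drop (i + 1) := by
    rw [List.drop_drop]
  have h3 : P.drop (i + 7) = (P.drop (i + 1)).drop 6 := by
    rw [List.drop_drop]
  rw [h1, h2, h3, ← List.take_add]

-- Loop invariant: starting from window P[i:i+7] and the stream tail P[i+7:],
-- the loop emits the windows at i, i+1, ….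
theorem gnf_loop_eq (P : List String) (r : List String) :
    ∀ i : Nat, r = P.drop (i + 7) →
      gnf_loop ((P.drop i).take 7) r =
        (List.range r.length).map (fun m => gnf_features ((P.drop (i + m)).take 7)) := by
  induction r with
  | nil => intro i _; simp [gnf_loop]
  | cons nxt r ih =>
    intro i h
    have h1 : (P.drop (i + 7)).take 1 = [nxt] := by rw [← h]; rfl
    have h2 : r = P.drop (i + 1 + 7) := by
      have h' : r = (P.drop (i + 7)).drop 1 := by rw [← h]; rfl
      rw [h', List.drop_drop]
    simp only [gnf_loop, List.length_cons, List.range_succ_eq_map, List.map_cons, List.map_map]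
    refine congrArg₂ _ (by rw [Nat.add_zero]) ?_
    rw [← h1, window_slide, ih (i + 1) h2]
    apply List.map_congr_left
    intro m _
    simp only [Function.comp]
    have : i + (m + 1) = i + 1 + m := by omega
    rw [this]

-- Reading a whole 7-token window positionwise.
theorem feats_take (l : List String) (h : 7 ≤ l.length) :
    gnf_features (l.take 7) =
      ["current" ++ l.getD 3 "",
       "pred1" ++ l.getD 2 "",
       "pred2" ++ l.getD 1 "",
       "pred3" ++ l.getD 0 "",
       "post1" ++ l.getD 4 "",
       "post2" ++ l.getD 5 "",
       "post3" ++ l.getD 6 "",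
       "pred1+current" ++ l.getD 2 "" ++ l.getD 3 "",
       "current+post1" ++ l.getD 3 "" ++ l.getD 4 "",
       "pred2+pred1" ++ l.getD 1 "" ++ l.getD 2 "",
       "post1+post2" ++ l.getD 4 "" ++ l.getD 5 "",
       "pred3+pred2" ++ l.getD 0 "" ++ l.getD 1 "",
       "post2+post3" ++ l.getD 5 "" ++ l.getD 6 "",
       "pred3+pred2+pred1" ++ l.getD 0 "" ++ l.getD 1 "" ++ l.getD 2 "",
       "post1+post2+post3" ++ l.getD 4 "" ++ l.getD 5 "" ++ l.getD 6 "",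
       "pred1+current+post1" ++ l.getD 2 "" ++ l.getD 3 "" ++ l.getD 4 "",
       "pred1+current" ++ l.getD 2 "" ++ l.getD 3 "",
       "current+post1+post2" ++ l.getD 3 "" ++ l.getD 4 "" ++ l.getD 5 ""] := by
  match l, h with
  | a :: b :: c :: d :: e :: f :: g :: t, _ =>
    simp [gnf_features, List.take]

theorem pad_eq_alt (X : List String) :
    gnf_pad X = generate_node_features_alt X := by
  unfold gnf_pad generate_node_features_alt
  dsimp only
  set P := List.replicate 3 "start" ++ X ++ List.replicate 3 "end" with hP
  set Q := P ++ ["end"] with hQ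
  have hQ2 : Q = ["start", "start", "start"] ++ (X ++ ["end", "end", "end", "end"]) := by
    simp only [hQ, hP]
    have h3 : List.replicate 3 "start" = ["start", "start", "start"] := rfl
    have he : List.replicate 3 "end" = ["end", "end", "end"] := rfl
    rw [h3, he]
    simp
  have hlen : P.length = X.length + 6 := by simp [hP]
  have hQlen : Q.length = X.length + 7 := by simp [hQ, hlen]
  have hw : ["start", "start", "start"] ++ (X ++ ["end", "end", "end", "end"]).take 4 = (Q.drop 0).take 7 := by
    rw [List.drop_zero, hQ2]
    simp [show (7 : Nat) = 3 + 4 from rfl]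
  have hr : (X ++ ["end", "end", "end", "end"]).drop 4 = Q.drop 7 := by
    rw [hQ2]
    simp [show (7 : Nat) = 3 + 4 from rfl]
  have hrlen : (Q.drop 7).length = X.length := by simp [hQlen]
  rw [hw, hr, gnf_loop_eq Q (Q.drop 7) 0 (by rw [Nat.zero_add]), hrlen]
  rw [PySem.List.pyRange_one]
  simp only [Int.sub_zero, Int.toNat_natCast, List.map_map]
  apply List.map_congr_left
  intro m hm
  have hmlt : m < X.length := List.mem_range.mp hm
  have hmlen : 7 ≤ (Q.drop m).length := by simp [hQlen]; omega
  rw [Nat.zero_add, feats_take _ hmlen]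
  have hget : ∀ k : Nat, k ≤ 6 → (Q.drop m).getD k "" = PySem.List.pyGetD P ((m + k : Nat) : Int) "" := by
    intro k hk
    rw [PySem.List.pyGetD_natCast, List.getD_eq_getElem?_getD, List.getD_eq_getElem?_getD,
        List.getElem?_drop, hQ, List.getElem?_append_left (by omega)]
  simp only [Function.comp, Int.zero_add]
  have c1 : ((m : Int) + 1) = ((m + 1 : Nat) : Int) := by push_cast; ring
  have c2 : ((m : Int) + 2) = ((m + 2 : Nat) : Int) := by push_cast; ring
  have c3 : ((m : Int) + 3) = ((m + 3 : Nat) : Int) := by push_cast; ring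
  have c4 : ((m : Int) + 4) = ((m + 4 : Nat) : Int) := by push_cast; ring
  have c5 : ((m : Int) + 5) = ((m + 5 : Nat) : Int) := by push_cast; ring
  have c6 : ((m : Int) + 6) = ((m + 6 : Nat) : Int) := by push_cast; ring
  rw [hget 0 (by omega), hget 1 (by omega), hget 2 (by omega), hget 3 (by omega),
      hget 4 (by omega), hget 5 (by omega), hget 6 (by omega)]
  simp only [Nat.add_zero]
  rw [c1, c2, c3, c4, c5, c6]

-- ===== VERDICT (by name: the statement is the Claim_ definition above) =====
theorem generate_node_features_spec : Claim_equal_generate_node_features := by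
  intro X _
  unfold Spec_generate_node_features
  rw [a_eq_pad, pad_eq_alt]
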